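-- pv_equiv track=rewrite | github.com/incolume-jedi/coding-dojo | incolume/py/coding_dojo_jedi/dojo20220926/dojo20220926.py | protein
-- ===== SOURCE A (Python) =====
-- def protein(chain: str) -> str:
--     """Fatoração com recursividade integrada."""
--     codons = {
--         'UUC': 'F',
--         'UUU': 'F',
--         'UUA': 'L',
--         'UUG': 'L',
--         'CUU': 'L',
--         'CUC': 'L',
--         'CUA': 'L',
--         'CUG': 'L',
--         'AUU': 'I',
--         'AUC': 'I',
--         'AUA': 'I',
--         'AUG': 'M',
--         'GUU': 'V',
--         'GUC': 'V',
--         'GUA': 'V',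
--         'GUG': 'V',
--         'UCU': 'S',
--         'UCC': 'S',
--         'UCA': 'S',
--         'UCG': 'S',
--         'AGU': 'S',
--         'AGC': 'S',
--         'CCU': 'P',
--         'CCC': 'P',
--         'CCA': 'P',
--         'CCG': 'P',
--         'ACU': 'T',
--         'ACC': 'T',
--         'ACA': 'T',
--         'ACG': 'T',
--         'GCU': 'A',
--         'GCC': 'A',
--         'GCA': 'A',
--         'GCG': 'A',
--         'UAU': 'Y',
--         'UAC': 'Y',
--         'CAU': 'H',
--         'CAC': 'H',
--         'CAA': 'Q',
--         'CAG': 'Q',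
--         'AAU': 'N',
--         'AAC': 'N',
--         'AAA': 'K',
--         'AAG': 'K',
--         'GAU': 'D',
--         'GAC': 'D',
--         'GAA': 'E',
--         'GAG': 'E',
--         'UGU': 'C',
--         'UGC': 'C',
--         'UGG': 'W',
--         'CGU': 'R',
--         'CGC': 'R',
--         'CGA': 'R',
--         'CGG': 'R',
--         'AGA': 'R',
--         'AGG': 'R',
--         'GGU': 'G',
--         'GGC': 'G',
--         'GGA': 'G',
--         'GGG': 'G',
--         'UAA': '',
--         'UGA': '',
--         'UAG': '',
--     }
--     chain = chain.upper()
--     if len(chain) <= 3:  # noqa: PLR2004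
--         return f'{codons.get(chain)}'
--     return f'{codons.get(chain[:3])}{protein(chain[3:])}'
-- ===== SOURCE B (Python) =====
-- _GROUPS = {
--     'F': ('UUC', 'UUU'),
--     'L': ('UUA', 'UUG', 'CUU', 'CUC', 'CUA', 'CUG'),
--     'I': ('AUU', 'AUC', 'AUA'),
--     'M': ('AUG',),
--     'V': ('GUU', 'GUC', 'GUA', 'GUG'),
--     'S': ('UCU', 'UCC', 'UCA', 'UCG', 'AGU', 'AGC'),
--     'P': ('CCU', 'CCC', 'CCA', 'CCG'),
--     'T': ('ACU', 'ACC', 'ACA', 'ACG'),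
--     'A': ('GCU', 'GCC', 'GCA', 'GCG'),
--     'Y': ('UAU', 'UAC'),
--     'H': ('CAU', 'CAC'),
--     'Q': ('CAA', 'CAG'),
--     'N': ('AAU', 'AAC'),
--     'K': ('AAA', 'AAG'),
--     'D': ('GAU', 'GAC'),
--     'E': ('GAA', 'GAG'),
--     'C': ('UGU', 'UGC'),
--     'W': ('UGG',),
--     'R': ('CGU', 'CGC', 'CGA', 'CGG', 'AGA', 'AGG'),
--     'G': ('GGU', 'GGC', 'GGA', 'GGG'),
--     '': ('UAA', 'UGA', 'UAG'),
-- }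
-- # codon -> amino acid, inverted once from the table grouped by amino acid
-- _CODONS = {c: aa for aa, cs in _GROUPS.items() for c in cs}
--
--
-- def protein(chain: str) -> str:
--     """Translate an RNA chain codon by codon in one front-to-back pass."""
--     chain = chain.upper()
--     return ''.join(str(_CODONS.get(chain[i:i + 3])) for i in range(0, len(chain), 3))
-- ===== Notes on version B (the rewrite author's own statement) =====
-- stated objective: faster
-- what changed: Replaces A's recursion on chain[3:] (which copies the remaining tail and nests f-string concatenations at every step) with a single iterative join over fixed-stride 3-character slices, with the codon table stored grouped by amino acid and inverted once.
-- intended difference: On the empty string A formats a failed dict lookup and so returns the four-character text that Python prints for a missing value, while B returns the empty string, the intended empty protein for an empty RNA chain. — e.g. on protein(""): A returns "None", B returns ""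
import Mathlib
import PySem

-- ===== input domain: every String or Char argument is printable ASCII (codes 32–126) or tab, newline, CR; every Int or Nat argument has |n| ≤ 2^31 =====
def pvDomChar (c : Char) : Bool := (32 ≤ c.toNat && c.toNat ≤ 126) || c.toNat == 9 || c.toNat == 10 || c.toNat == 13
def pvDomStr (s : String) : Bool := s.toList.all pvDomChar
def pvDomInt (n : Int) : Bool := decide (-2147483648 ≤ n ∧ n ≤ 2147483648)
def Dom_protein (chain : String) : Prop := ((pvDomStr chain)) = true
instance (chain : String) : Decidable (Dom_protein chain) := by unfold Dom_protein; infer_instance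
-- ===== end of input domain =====

-- B replaces A's recursion on chain[3:] with one iterative pass over 3-character
-- slices, its codon table grouped by amino acid and inverted once (objective: faster).

-- shared helper: how Python formats an Optional[str] via f'{...}'/str(...):
-- None prints as "None", a str prints as itself
def pvFmt : Option (List Char) → List Char
  | none => ['N', 'o', 'n', 'e']
  | some s => s

-- ===== PORT A =====
-- A's flat codon dict, keys/values as char lists
def pvCodons : PySem.Dict (List Char) (List Char) := PySem.Dict.ofList [
  (['U', 'U', 'C'], ['F']),
  (['U', 'U', 'U'], ['F']),
  (['U', 'U', 'A'], ['L']),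
  (['U', 'U', 'G'], ['L']),
  (['C', 'U', 'U'], ['L']),
  (['C', 'U', 'C'], ['L']),
  (['C', 'U', 'A'], ['L']),
  (['C', 'U', 'G'], ['L']),
  (['A', 'U', 'U'], ['I']),
  (['A', 'U', 'C'], ['I']),
  (['A', 'U', 'A'], ['I']),
  (['A', 'U', 'G'], ['M']),
  (['G', 'U', 'U'], ['V']),
  (['G', 'U', 'C'], ['V']),
  (['G', 'U', 'A'], ['V']),
  (['G', 'U', 'G'], ['V']),
  (['U', 'C', 'U'], ['S']),
  (['U', 'C', 'C'], ['S']),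
  (['U', 'C', 'A'], ['S']),
  (['U', 'C', 'G'], ['S']),
  (['A', 'G', 'U'], ['S']),
  (['A', 'G', 'C'], ['S']),
  (['C', 'C', 'U'], ['P']),
  (['C', 'C', 'C'], ['P']),
  (['C', 'C', 'A'], ['P']),
  (['C', 'C', 'G'], ['P']),
  (['A', 'C', 'U'], ['T']),
  (['A', 'C', 'C'], ['T']),
  (['A', 'C', 'A'], ['T']),
  (['A', 'C', 'G'], ['T']),
  (['G', 'C', 'U'], ['A']),
  (['G', 'C', 'C'], ['A']),
  (['G', 'C', 'A'], ['A']),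
  (['G', 'C', 'G'], ['A']),
  (['U', 'A', 'U'], ['Y']),
  (['U', 'A', 'C'], ['Y']),
  (['C', 'A', 'U'], ['H']),
  (['C', 'A', 'C'], ['H']),
  (['C', 'A', 'A'], ['Q']),
  (['C', 'A', 'G'], ['Q']),
  (['A', 'A', 'U'], ['N']),
  (['A', 'A', 'C'], ['N']),
  (['A', 'A', 'A'], ['K']),
  (['A', 'A', 'G'], ['K']),
  (['G', 'A', 'U'], ['D']),
  (['G', 'A', 'C'], ['D']),
  (['G', 'A', 'A'], ['E']),
  (['G', 'A', 'G'], ['E']),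
  (['U', 'G', 'U'], ['C']),
  (['U', 'G', 'C'], ['C']),
  (['U', 'G', 'G'], ['W']),
  (['C', 'G', 'U'], ['R']),
  (['C', 'G', 'C'], ['R']),
  (['C', 'G', 'A'], ['R']),
  (['C', 'G', 'G'], ['R']),
  (['A', 'G', 'A'], ['R']),
  (['A', 'G', 'G'], ['R']),
  (['G', 'G', 'U'], ['G']),
  (['G', 'G', 'C'], ['G']),
  (['G', 'G', 'A'], ['G']),
  (['G', 'G', 'G'], ['G']),
  (['U', 'A', 'A'], []),
  (['U', 'G', 'A'], []),
  (['U', 'A', 'G'], [])]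

def proteinAux (cs : List Char) : List Char :=
  let c2 := PySem.Chars.upper cs
  if c2.length ≤ 3 then pvFmt (pvCodons.get? c2)
  else pvFmt (pvCodons.get? (PySem.Chars.slice c2 none (some 3))) ++
       proteinAux (PySem.Chars.slice c2 (some 3) none)
termination_by cs.length
decreasing_by
  simp only [c2, PySem.Chars.slice_eq_listSlice, PySem.List.slice_some_none, PySem.List.clampIdx,
    List.length_drop, PySem.Chars.upper, List.length_map] at *
  norm_num at *
  omega

def protein (chain : String) : String := String.ofList (proteinAux chain.toList)

-- ===== PORT B =====
-- B's table: amino acid -> its codons, as in Source B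
def altGroups : List (String × List String) := [
  ("F", ["UUC", "UUU"]),
  ("L", ["UUA", "UUG", "CUU", "CUC", "CUA", "CUG"]),
  ("I", ["AUU", "AUC", "AUA"]),
  ("M", ["AUG"]),
  ("V", ["GUU", "GUC", "GUA", "GUG"]),
  ("S", ["UCU", "UCC", "UCA", "UCG", "AGU", "AGC"]),
  ("P", ["CCU", "CCC", "CCA", "CCG"]),
  ("T", ["ACU", "ACC", "ACA", "ACG"]),
  ("A", ["GCU", "GCC", "GCA", "GCG"]),
  ("Y", ["UAU", "UAC"]),
  ("H", ["CAU", "CAC"]),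
  ("Q", ["CAA", "CAG"]),
  ("N", ["AAU", "AAC"]),
  ("K", ["AAA", "AAG"]),
  ("D", ["GAU", "GAC"]),
  ("E", ["GAA", "GAG"]),
  ("C", ["UGU", "UGC"]),
  ("W", ["UGG"]),
  ("R", ["CGU", "CGC", "CGA", "CGG", "AGA", "AGG"]),
  ("G", ["GGU", "GGC", "GGA", "GGG"]),
  ("", ["UAA", "UGA", "UAG"])]

-- the dict comprehension {c: aa for aa, cs in _GROUPS.items() for c in cs}
def altCodons : PySem.Dict (List Char) (List Char) :=
  PySem.Dict.ofList (altGroups.flatMap (fun p => p.2.map (fun c => (c.toList, p.1.toList))))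

def protein_alt (chain : String) : String :=
  let c2 := PySem.Chars.upper chain.toList
  PySem.Str.join "" ((PySem.List.pyRange 0 (c2.length : Int) 3).map
    (fun i => String.ofList (pvFmt (altCodons.get? (PySem.Chars.slice c2 (some i) (some (i + 3)))))))

-- ===== PRECONDITION & SPEC =====
-- On the empty string A formats a failed dict lookup and so returns the four-character
-- text that Python prints for a missing value, while B returns the empty string,
-- the intended empty protein for an empty RNA chain.
def D_protein (chain : String) : Prop := chain = ""
instance (chain : String) : Decidable (D_protein chain) := by unfold D_protein; infer_instance

def Spec_protein (chain : String) (out : String) : Prop := ¬ D_protein chain → out = protein_alt chain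
instance (chain : String) (out : String) : Decidable (Spec_protein chain out) := by unfold Spec_protein; infer_instance

def pvDiffWitness_protein : String := ""
def pvDiffWitnessOut_protein : String × String := ("None", "")

-- ===== CLAIM (what is proved, stated in full; the proofs are below) =====
def Claim_unchanged_protein : Prop := ∀ (chain : String), Dom_protein chain → Spec_protein chain (protein chain)
def Claim_changed_protein : Prop := Dom_protein (pvDiffWitness_protein) ∧ D_protein (pvDiffWitness_protein) ∧ protein (pvDiffWitness_protein) = pvDiffWitnessOut_protein.1 ∧ protein_alt (pvDiffWitness_protein) = pvDiffWitnessOut_protein.2 ∧ pvDiffWitnessOut_protein.1 ≠ pvDiffWitnessOut_protein.2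
def Claim_exact_protein : Prop := ∀ (chain : String), Dom_protein chain → D_protein chain → protein chain ≠ protein_alt chain

-- ===== LEMMAS AND PROOFS =====

-- B's two tables agree entry for entry (the inversion flattens to A's literal list)
set_option maxRecDepth 100000 in
theorem altCodons_eq_pvCodons : altCodons = pvCodons := by rfl

-- B's loop body on the char-list level
def pvBody (u : List Char) : List Char :=
  PySem.Chars.join [] ((PySem.List.pyRange 0 (u.length : Int) 3).map
    (fun i => pvFmt (pvCodons.get? (PySem.List.slice u (some i) (some (i + 3))))))

theorem upperChar_idem (c : Char) :
    PySem.Chars.upperChar (PySem.Chars.upperChar c) = PySem.Chars.upperChar c := by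
  unfold PySem.Chars.upperChar PySem.Chars.islower
  by_cases h : 'a' ≤ c ∧ c ≤ 'z'
  · have hv2 : 97 ≤ c.toNat := h.1
    have hv : c.toNat ≤ 122 := h.2
    simp only [h.1, h.2, decide_true, Bool.and_self, if_true]
    have hval : (c.toNat - 32).isValidChar := by left; omega
    have ht : (Char.ofNat (c.toNat - 32)).toNat = c.toNat - 32 := by
      rw [Char.toNat_ofNat, if_pos hval]
    have h1 : ¬ ('a' ≤ Char.ofNat (c.toNat - 32)) := by
      rw [Char.le_def]
      intro hc
      have : (97 : Nat) ≤ (Char.ofNat (c.toNat - 32)).toNat := hc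
      omega
    simp [h1]
  · simp [h]

theorem join_empty_cons (x : List Char) (rest : List (List Char)) :
    PySem.Chars.join [] (x :: rest) = x ++ PySem.Chars.join [] rest := by
  cases rest with
  | nil => simp [PySem.Chars.join_singleton, PySem.Chars.join_nil]
  | cons q r => simp [PySem.Chars.join_cons_cons]

-- B collapses to one lookup on inputs of length 1..3
theorem pvBody_small (u : List Char) (h0 : u ≠ []) (h : u.length ≤ 3) :
    pvBody u = pvFmt (pvCodons.get? u) := by
  unfold pvBody
  have hr : PySem.List.pyRange 0 (u.length : Int) 3 = [0] := by
    rw [PySem.List.pyRange_of_pos _ _ (by norm_num)]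
    have h1 : 1 ≤ u.length := List.length_pos_of_ne_nil h0
    interval_cases h : u.length <;> decide
  rw [hr]
  simp only [List.map_cons, List.map_nil, PySem.Chars.join_singleton]
  have h3 : (0 : Int) + 3 = ((3 : Nat) : Int) := by norm_num
  rw [show (some (0 : Int)) = some ((0 : Nat) : Int) by norm_num, h3,
    PySem.List.slice_natCast]
  simp [List.take_of_length_le (by omega : u.length ≤ 3 - 0)]

-- B peels its first slice on inputs of length ≥ 4
set_option maxRecDepth 8192 in
theorem pvBody_step (u : List Char) (h : 4 ≤ u.length) :
    pvBody u = pvFmt (pvCodons.get? (u.take 3)) ++ pvBody (u.drop 3) := by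
  unfold pvBody
  have hm : (u.drop 3).length = u.length - 3 := by simp
  rw [hm]
  have hcast : (((u.length - 3 : Nat)) : Int) = (u.length : Int) - 3 := by omega
  rw [hcast]
  rw [PySem.List.pyRange_of_pos _ _ (by norm_num), PySem.List.pyRange_of_pos _ _ (by norm_num)]
  have hlt1 : (0 : Int) < u.length := by omega
  have hlt2 : (0 : Int) < (u.length : Int) - 3 := by omega
  rw [if_pos hlt1, if_pos hlt2]
  have hcount : (((u.length : Int) - 0 + 3 - 1) / 3).toNat
      = ((((u.length : Int) - 3) - 0 + 3 - 1) / 3).toNat + 1 := by omega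
  rw [hcount, List.range_succ_eq_map]
  simp only [List.map_cons, List.map_map]
  rw [join_empty_cons]
  congr 1
  · -- head: slice u [0:3] = take 3
    have : (0 : Int) + 3 * ((0 : Nat) : Int) = ((0 : Nat) : Int) := by norm_num
    rw [this]
    have h3 : ((0 : Nat) : Int) + 3 = ((3 : Nat) : Int) := by norm_num
    rw [h3, PySem.List.slice_natCast]
    norm_num
  · -- tail: reindex k+1 on u to k on u.drop 3
    congr 1
    apply List.map_congr_left
    intro k _
    simp only [Function.comp]
    have e1 : (0 : Int) + 3 * ((Nat.succ k : Nat) : Int) = ((3 * k + 3 : Nat) : Int) := by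
      push_cast; ring
    have e2 : ((3 * k + 3 : Nat) : Int) + 3 = ((3 * k + 6 : Nat) : Int) := by push_cast; ring
    have e3 : (0 : Int) + 3 * ((k : Nat) : Int) = ((3 * k : Nat) : Int) := by push_cast; ring
    have e4 : ((3 * k : Nat) : Int) + 3 = ((3 * k + 3 : Nat) : Int) := by push_cast; ring
    rw [e1, e2, e3, e4, PySem.List.slice_natCast, PySem.List.slice_natCast]
    rw [List.drop_drop, show (3 : Nat) + 3 * k = 3 * k + 3 from by ring,
      show 3 * k + 6 - (3 * k + 3) = 3 from by omega,
      show 3 * k + 3 - 3 * k = 3 from by omega]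

theorem proteinAux_eq_pvBody : ∀ (n : Nat) (cs : List Char), cs.length = n → cs ≠ [] →
    proteinAux cs = pvBody (PySem.Chars.upper cs) := by
  intro n
  induction n using Nat.strong_induction_on with
  | _ n ih =>
    intro cs hn hne
    rw [proteinAux.eq_def]
    dsimp only
    simp only [PySem.Chars.slice_eq_listSlice]
    have hlen : (PySem.Chars.upper cs).length = cs.length := by
      simp [PySem.Chars.upper]
    have hune : PySem.Chars.upper cs ≠ [] := by
      intro h0
      apply hne
      have := congrArg List.length h0
      rw [hlen] at this
      exact List.eq_nil_of_length_eq_zero this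
    by_cases h : (PySem.Chars.upper cs).length ≤ 3
    · rw [if_pos h, pvBody_small _ hune h]
    · rw [if_neg h]
      have h4 : 4 ≤ (PySem.Chars.upper cs).length := by omega
      rw [pvBody_step _ h4]
      have hto : PySem.List.slice (PySem.Chars.upper cs) none (some 3)
          = (PySem.Chars.upper cs).take 3 := by simp [pysem]
      have hfrom : PySem.List.slice (PySem.Chars.upper cs) (some 3)
          = (PySem.Chars.upper cs).drop 3 := by simp [pysem]
      rw [hto, hfrom]
      congr 1
      have hrec := ih (cs.length - 3) (by omega) ((PySem.Chars.upper cs).drop 3)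
        (by simp [hlen])
        (by intro h0; have := congrArg List.length h0; simp [hlen] at this; omega)
      rw [hrec]
      congr 1
      simp only [PySem.Chars.upper, List.map_drop, List.map_map]
      congr 1
      apply List.map_congr_left
      intro a _
      exact upperChar_idem a

theorem protein_alt_eq (chain : String) :
    protein_alt chain = String.ofList (pvBody (PySem.Chars.upper chain.toList)) := by
  unfold protein_alt pvBody PySem.Str.join
  rw [altCodons_eq_pvCodons]
  have hlen : (PySem.Chars.upper chain.toList).length = chain.toList.length := by
    simp [PySem.Chars.upper]
  simp only [PySem.Chars.slice_eq_listSlice, List.map_map, Function.comp_def,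
    String.toList_ofList, hlen, pvFmt]
  norm_num

theorem toList_ne_nil_of_ne_empty (chain : String) (h : chain ≠ "") : chain.toList ≠ [] := by
  intro h0
  apply h
  have := congrArg String.ofList h0
  simpa using this

-- ===== VERDICT (by name: the statement is the Claim_ definition above) =====
set_option maxRecDepth 100000 in
theorem protein_empty : protein "" = "None" := by
  show String.ofList (proteinAux "".toList) = "None"
  rw [proteinAux.eq_def]
  decide

theorem protein_spec : Claim_unchanged_protein := by
  intro chain _ hD
  unfold protein
  rw [protein_alt_eq, proteinAux_eq_pvBody chain.toList.length chain.toList rfl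
    (toList_ne_nil_of_ne_empty chain hD)]

theorem protein_changed : Claim_changed_protein := by
  unfold Claim_changed_protein
  exact ⟨by decide, rfl, protein_empty, by decide, by decide⟩

theorem protein_tight : Claim_exact_protein := by
  intro chain _ hD
  unfold D_protein at hD
  subst hD
  rw [protein_empty]
  decide
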